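-- pv_equiv track=rewrite | github.com/jernejjanez/advent-of-code | 2023/day-02/day02.py | is_draw_possible
-- ===== SOURCE A (Python) =====
-- def is_draw_possible(drawn_cubes, max_red, max_green, max_blue):
--     for cubes in drawn_cubes:
--         number, color = cubes.split()
--         if color == "red" and int(number) > max_red:
--             return False
--         if color == "green" and int(number) > max_green:
--             return False
--         if color == "blue" and int(number) > max_blue:
--             return False
--     return True
-- ===== SOURCE B (Python) =====
-- def is_draw_possible(drawn_cubes, max_red, max_green, max_blue):
--     max_r = max_g = max_b = None
--     for cubes in drawn_cubes:
--         number, color = cubes.split()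
--         if color == "red":
--             n = int(number)
--             max_r = n if max_r is None or n > max_r else max_r
--         elif color == "green":
--             n = int(number)
--             max_g = n if max_g is None or n > max_g else max_g
--         elif color == "blue":
--             n = int(number)
--             max_b = n if max_b is None or n > max_b else max_b
--     return ((max_r is None or max_r <= max_red)
--             and (max_g is None or max_g <= max_green)
--             and (max_b is None or max_b <= max_blue))
-- ===== Notes on version B (the rewrite author's own statement) =====
-- stated objective: alternative
-- what changed: B replaces A's check-while-scanning with early exit by a single aggregation pass that keeps the maximum count seen per color and one combined comparison against the three limits at the end.
-- outside the precondition, e.g. on is_draw_possible(['5 red', 'oops'], 1, 10, 10): A returns False, B raises ValueError; on is_draw_possible(['5 red', 'abc green'], 1, 10, 10): A returns False, B raises ValueError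
import Mathlib
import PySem

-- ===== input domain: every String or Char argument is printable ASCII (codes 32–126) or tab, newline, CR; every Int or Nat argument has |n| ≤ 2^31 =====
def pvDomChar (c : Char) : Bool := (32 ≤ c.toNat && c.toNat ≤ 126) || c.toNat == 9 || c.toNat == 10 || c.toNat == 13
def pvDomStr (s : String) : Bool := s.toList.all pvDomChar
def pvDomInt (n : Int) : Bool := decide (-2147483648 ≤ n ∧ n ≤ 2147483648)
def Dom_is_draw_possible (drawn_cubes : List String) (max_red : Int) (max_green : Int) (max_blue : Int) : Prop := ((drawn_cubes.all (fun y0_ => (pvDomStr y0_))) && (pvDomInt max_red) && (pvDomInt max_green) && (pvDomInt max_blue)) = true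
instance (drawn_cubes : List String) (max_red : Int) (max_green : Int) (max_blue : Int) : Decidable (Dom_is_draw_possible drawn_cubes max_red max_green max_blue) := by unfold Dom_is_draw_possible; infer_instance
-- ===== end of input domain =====

-- B aggregates the per-color maxima in one pass (no early exit) and compares once at the end;
-- same cost, different decomposition. Equivalence is over the return value on well-formed inputs.

-- `number, color = cubes.split()`: the two words, none = ValueError (wrong number of words);
-- shared by both ports, since both Pythons contain this very line
def pvSplit2? (s : String) : Option (String × String) :=
  match PySem.Str.split₀ s with
  | [number, color] => some (number, color)
  | _ => none

-- ===== PORT A =====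
-- literal transliteration of A's loop with early returns; the `none => false` arm and `getD 0`
-- stand for inputs where Python raises (bad split / bad int), which Pre_ excludes.
def is_draw_possible (drawn_cubes : List String) (max_red : Int) (max_green : Int) (max_blue : Int) : Bool :=
  match drawn_cubes with
  | [] => true
  | cubes :: rest =>
    match pvSplit2? cubes with
    | some (number, color) =>
      if color == "red" && decide ((PySem.Int.ofStr? number).getD 0 > max_red) then false
      else if color == "green" && decide ((PySem.Int.ofStr? number).getD 0 > max_green) then false
      else if color == "blue" && decide ((PySem.Int.ofStr? number).getD 0 > max_blue) then false
      else is_draw_possible rest max_red max_green max_blue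
    | none => false

-- ===== PORT B =====
-- `max_r = n if max_r is None or n > max_r else max_r`
def pvAltUpd (o : Option Int) (n : Int) : Option Int :=
  if o.isNone || decide (n > o.getD 0) then some n else o

-- one iteration of B's for loop over the state (max_r, max_g, max_b); where Python would
-- raise (bad split / bad int, excluded by Pre_) the defaults leave the behaviour total
def pvAltStep (st : Option Int × Option Int × Option Int) (cubes : String) :
    Option Int × Option Int × Option Int :=
  let p := (pvSplit2? cubes).getD ("", "")
  let n := (PySem.Int.ofStr? p.1).getD 0
  if p.2 == "red" then (pvAltUpd st.1 n, st.2.1, st.2.2)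
  else if p.2 == "green" then (st.1, pvAltUpd st.2.1 n, st.2.2)
  else if p.2 == "blue" then (st.1, st.2.1, pvAltUpd st.2.2 n)
  else st

def is_draw_possible_alt (drawn_cubes : List String) (max_red : Int) (max_green : Int) (max_blue : Int) : Bool :=
  let st := drawn_cubes.foldl pvAltStep (none, none, none)
  (st.1.isNone || decide (st.1.getD 0 ≤ max_red)) &&
  (st.2.1.isNone || decide (st.2.1.getD 0 ≤ max_green)) &&
  (st.2.2.isNone || decide (st.2.2.getD 0 ≤ max_blue))

-- ===== PRECONDITION & SPEC =====
-- an entry is well formed: it splits into exactly two words and, when the color is one of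
-- red/green/blue, the number parses as a Python int
def pvEntryOk (s : String) : Bool :=
  (pvSplit2? s).isSome &&
    (let q := (pvSplit2? s).getD ("", "")
     !(q.2 == "red" || q.2 == "green" || q.2 == "blue") || (PySem.Int.ofStr? q.1).isSome)

-- Pre_ excludes inputs on which Python A raises (an entry that does not split into two words,
-- or an unparsable number next to a known color); it also excludes inputs where A returns False
-- before reaching such a malformed later entry, on which B naturally raises instead.
def Pre_is_draw_possible (drawn_cubes : List String) (max_red : Int) (max_green : Int) (max_blue : Int) : Prop :=
  ∀ s ∈ drawn_cubes, pvEntryOk s = true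
instance (drawn_cubes : List String) (max_red : Int) (max_green : Int) (max_blue : Int) : Decidable (Pre_is_draw_possible drawn_cubes max_red max_green max_blue) := by unfold Pre_is_draw_possible; infer_instance

def pvWitness_is_draw_possible : List String × Int × Int × Int :=
  (["3 red", "5 green", "2 blue", "1 purple"], 4, 5, 3)

def Spec_is_draw_possible (drawn_cubes : List String) (max_red : Int) (max_green : Int) (max_blue : Int) (out : Bool) : Prop := out = is_draw_possible_alt drawn_cubes max_red max_green max_blue
instance (drawn_cubes : List String) (max_red : Int) (max_green : Int) (max_blue : Int) (out : Bool) : Decidable (Spec_is_draw_possible drawn_cubes max_red max_green max_blue out) := by unfold Spec_is_draw_possible; infer_instance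

-- ===== CLAIM (what is proved, stated in full; the proofs are below) =====
def Claim_equal_is_draw_possible : Prop := ∀ (drawn_cubes : List String) (max_red : Int) (max_green : Int) (max_blue : Int), Dom_is_draw_possible drawn_cubes max_red max_green max_blue → Pre_is_draw_possible drawn_cubes max_red max_green max_blue → Spec_is_draw_possible drawn_cubes max_red max_green max_blue (is_draw_possible drawn_cubes max_red max_green max_blue)

-- ===== LEMMAS AND PROOFS =====

def pvOk (m : Int) (o : Option Int) : Bool := o.isNone || decide (o.getD 0 ≤ m)

theorem pvOk_upd (m : Int) (o : Option Int) (n : Int) :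
    pvOk m (pvAltUpd o n) = (decide (n ≤ m) && pvOk m o) := by
  cases o with
  | none => simp [pvOk, pvAltUpd]
  | some v =>
    simp only [pvOk, pvAltUpd, Option.isNone_some, Bool.false_or, Option.getD_some]
    split_ifs with h
    · simp only [Option.isNone_some, Bool.false_or, Option.getD_some]
      simp only [decide_eq_true_eq] at h
      by_cases hm : n ≤ m
      · simp [hm]; omega
      · simp [hm]
    · simp only [Option.isNone_some, Bool.false_or, Option.getD_some]
      simp only [decide_eq_true_eq] at h
      by_cases hv : v ≤ m
      · simp [hv, show n ≤ m by omega]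
      · simp [hv]

theorem pvLoop_main (drawn_cubes : List String) (max_red max_green max_blue : Int)
    (st : Option Int × Option Int × Option Int)
    (hpre : ∀ s ∈ drawn_cubes, pvEntryOk s = true) :
    (pvOk max_red (drawn_cubes.foldl pvAltStep st).1 &&
     pvOk max_green (drawn_cubes.foldl pvAltStep st).2.1 &&
     pvOk max_blue (drawn_cubes.foldl pvAltStep st).2.2) =
    (pvOk max_red st.1 && pvOk max_green st.2.1 && pvOk max_blue st.2.2 &&
      is_draw_possible drawn_cubes max_red max_green max_blue) := by
  induction drawn_cubes generalizing st with
  | nil => simp [is_draw_possible]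
  | cons cubes rest ih =>
    have hc := hpre cubes (by simp)
    have hrest : ∀ s ∈ rest, pvEntryOk s = true := fun s hs => hpre s (by simp [hs])
    unfold pvEntryOk at hc
    simp only [Bool.and_eq_true, Option.isSome_iff_exists] at hc
    obtain ⟨⟨⟨number, color⟩, hp⟩, -⟩ := hc
    simp only [List.foldl_cons, is_draw_possible, hp]
    rw [ih _ hrest]
    unfold pvAltStep
    simp only [hp, Option.getD_some]
    by_cases hr : color = "red"
    · subst hr
      simp only [beq_self_eq_true, Bool.true_and, if_true, ite_true, pvOk_upd]
      by_cases hle : (PySem.Int.ofStr? number).getD 0 ≤ max_red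
      · rw [if_neg (by simp; omega)]
        simp [hle, Bool.and_assoc]
      · rw [if_pos (by simp; omega)]
        simp [hle]
    · have h1 : (color == "red") = false := by simp [hr]
      by_cases hg : color = "green"
      · subst hg
        simp only [h1, Bool.false_and, if_neg (Bool.false_ne_true), beq_self_eq_true,
          Bool.true_and, if_true, ite_true, pvOk_upd]
        by_cases hle : (PySem.Int.ofStr? number).getD 0 ≤ max_green
        · rw [if_neg (by simp; omega)]
          simp [hle]
        · rw [if_pos (by simp; omega)]
          simp [hle]
      · have h2 : (color == "green") = false := by simp [hg]
        by_cases hb : color = "blue"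
        · subst hb
          simp only [h1, h2, Bool.false_and, if_neg (Bool.false_ne_true), beq_self_eq_true,
            Bool.true_and, if_true, ite_true, pvOk_upd]
          by_cases hle : (PySem.Int.ofStr? number).getD 0 ≤ max_blue
          · rw [if_neg (by simp; omega)]
            simp [hle]
          · rw [if_pos (by simp; omega)]
            simp [hle]
        · have h3 : (color == "blue") = false := by simp [hb]
          simp only [h1, h2, h3, Bool.false_and, if_neg (Bool.false_ne_true)]

-- ===== VERDICT (by name: the statement is the Claim_ definition above) =====
theorem is_draw_possible_spec : Claim_equal_is_draw_possible := by
  intro drawn_cubes max_red max_green max_blue _ hpre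
  unfold Spec_is_draw_possible is_draw_possible_alt
  have h := pvLoop_main drawn_cubes max_red max_green max_blue (none, none, none) hpre
  simp only [pvOk, Option.isNone_none, Bool.true_or, Bool.true_and] at h
  simp only [← h]
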